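-- pv_equiv track=rewrite | github.com/mmsqe/pydefi | pydefi/vm/program.py | _tuple_component_types
-- ===== SOURCE A (Python) =====
-- def _tuple_component_types(abi_type: str) -> list[str]:
--     """Split a tuple ABI type string ``(T1,T2,...)`` into its components.
--
--     ``"(address,uint256)"`` → ``["address", "uint256"]``,
--     ``"(address,(uint256,uint256))"`` → ``["address", "(uint256,uint256)"]``.
--     Returns ``[]`` if *abi_type* is not a tuple type.
--
--     Respects nesting — commas inside nested tuples / fixed arrays do not
--     split components at the outer level.
--     """
--     if not (abi_type.startswith("(") and abi_type.endswith(")")):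
--         return []
--     inner = abi_type[1:-1]
--     parts: list[str] = []
--     depth = 0
--     cur = ""
--     for ch in inner:
--         if ch == "," and depth == 0:
--             parts.append(cur)
--             cur = ""
--             continue
--         if ch == "(":
--             depth += 1
--         elif ch == ")":
--             depth -= 1
--         cur += ch
--     if cur:
--         parts.append(cur)
--     return parts
-- ===== SOURCE B (Python) =====
-- def _tuple_component_types(abi_type: str) -> list[str]:
--     """Recursive head-segment decomposition: peel off the segment before the
--     first top-level comma and recurse on the remainder (instead of one
--     accumulator fold building every part)."""
--     if not (abi_type.startswith("(") and abi_type.endswith(")")):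
--         return []
--     return _split(abi_type[1:-1])
--
--
-- def _split(s: str) -> list[str]:
--     if not s:
--         return []
--     depth = 0
--     for i, ch in enumerate(s):
--         if ch == "(":
--             depth += 1
--         elif ch == ")":
--             depth -= 1
--         elif ch == "," and depth == 0:
--             return [s[:i]] + _split(s[i + 1:])
--     return [s]
-- ===== Notes on version B (the rewrite author's own statement) =====
-- stated objective: alternative
-- what changed: Replaces the single accumulator fold (parts/depth/cur state with a trailing-cur flush) by a recursive head-segment decomposition: find the first top-level comma, emit the prefix, recurse on the remainder; the empty remainder base case makes the trailing-empty drop fall out naturally.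
import Mathlib
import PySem

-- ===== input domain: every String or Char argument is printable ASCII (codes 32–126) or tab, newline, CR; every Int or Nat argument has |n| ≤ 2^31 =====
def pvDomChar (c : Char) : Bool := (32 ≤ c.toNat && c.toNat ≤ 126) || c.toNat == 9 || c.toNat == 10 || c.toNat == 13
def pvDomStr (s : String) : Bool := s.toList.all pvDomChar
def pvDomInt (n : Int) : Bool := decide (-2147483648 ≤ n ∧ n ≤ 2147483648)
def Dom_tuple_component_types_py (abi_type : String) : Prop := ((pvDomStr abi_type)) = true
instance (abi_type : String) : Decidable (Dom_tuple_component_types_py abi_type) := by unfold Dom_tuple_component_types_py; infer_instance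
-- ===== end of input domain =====

-- B replaces A's accumulator fold by recursive head-segment splitting at the first top-level comma (alternative decomposition, same cost).

-- ===== PORT A =====
-- loop body of A: state = (parts, depth, cur); strings kept as List Char, converted at the end
def pvStepA (st : List (List Char) × Int × List Char) (ch : Char) : List (List Char) × Int × List Char :=
  if ch = ',' ∧ st.2.1 = 0 then (st.1 ++ [st.2.2], st.2.1, [])
  else
    (st.1,
     (if ch = '(' then st.2.1 + 1 else if ch = ')' then st.2.1 - 1 else st.2.1),
     st.2.2 ++ [ch])

def tuple_component_types_py (abi_type : String) : List String :=
  if ¬ (PySem.Str.startswith abi_type "(" && PySem.Str.endswith abi_type ")") then []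
  else
    let st := (PySem.Chars.slice abi_type.toList (some 1) (some (-1))).foldl pvStepA ([], 0, [])
    (if st.2.2 ≠ [] then st.1 ++ [st.2.2] else st.1).map String.ofList

-- ===== PORT B =====
-- B's inner loop: first top-level comma, returning (s[:i], s[i+1:]); none if there is no top-level comma
def pvFindCut (d : Int) : List Char → Option (List Char × List Char)
  | [] => none
  | c :: cs =>
    if c = ',' ∧ d = 0 then some ([], cs)
    else
      match pvFindCut (if c = '(' then d + 1 else if c = ')' then d - 1 else d) cs with
      | some (h, t) => some (c :: h, t)
      | none => none

-- termination helper for pvSplit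
theorem pvFindCut_length {d : Int} : ∀ {l h t : List Char},
    pvFindCut d l = some (h, t) → t.length < l.length := by
  intro l
  induction l generalizing d with
  | nil => intro h t hc; simp [pvFindCut] at hc
  | cons c cs ih =>
    intro h t hc
    simp only [pvFindCut] at hc
    split at hc
    · injection hc with hp
      injection hp with h1 h2
      subst h2; simp
    · cases hfc : pvFindCut (if c = '(' then d + 1 else if c = ')' then d - 1 else d) cs with
      | none => rw [hfc] at hc; simp at hc
      | some p =>
        rw [hfc] at hc
        obtain ⟨h', t'⟩ := p
        injection hc with hp
        injection hp with h1 h2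
        subst h2
        have := ih (d := (if c = '(' then d + 1 else if c = ')' then d - 1 else d)) hfc
        simp only [List.length_cons]
        omega

def pvSplit (l : List Char) : List (List Char) :=
  if l = [] then []
  else
    match hc : pvFindCut 0 l with
    | some (h, t) => h :: pvSplit t
    | none => [l]
termination_by l.length
decreasing_by exact pvFindCut_length hc

def tuple_component_types_py_alt (abi_type : String) : List String :=
  if ¬ (PySem.Str.startswith abi_type "(" && PySem.Str.endswith abi_type ")") then []
  else
    (pvSplit (PySem.Chars.slice abi_type.toList (some 1) (some (-1)))).map String.ofList

-- ===== PRECONDITION & SPEC =====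
def Spec_tuple_component_types_py (abi_type : String) (out : List String) : Prop := out = tuple_component_types_py_alt abi_type
instance (abi_type : String) (out : List String) : Decidable (Spec_tuple_component_types_py abi_type out) := by unfold Spec_tuple_component_types_py; infer_instance

-- ===== CLAIM (what is proved, stated in full; the proofs are below) =====
def Claim_equal_tuple_component_types_py : Prop := ∀ (abi_type : String), Dom_tuple_component_types_py abi_type → Spec_tuple_component_types_py abi_type (tuple_component_types_py abi_type)

-- ===== LEMMAS AND PROOFS =====

-- intermediate characterisation: segments of l at running depth d with pending prefix cur, trailing empty segment dropped
def pvSegs (d : Int) (cur : List Char) : List Char → List (List Char)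
  | [] => if cur = [] then [] else [cur]
  | c :: cs =>
    if c = ',' ∧ d = 0 then cur :: pvSegs d [] cs
    else pvSegs (if c = '(' then d + 1 else if c = ')' then d - 1 else d) (cur ++ [c]) cs

theorem pvSplit_eq (l : List Char) :
    pvSplit l = if l = [] then [] else
      match pvFindCut 0 l with
      | some (h, t) => h :: pvSplit t
      | none => [l] := by
  rw [pvSplit.eq_def]
  by_cases hl : l = []
  · simp [hl]
  · simp only [if_neg hl]
    cases hfc : pvFindCut 0 l with
    | some p => obtain ⟨h, t⟩ := p; rfl
    | none => rfl

theorem pvFoldA_eq_pvSegs : ∀ (l : List Char) (parts : List (List Char)) (d : Int) (cur : List Char),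
    (if (List.foldl pvStepA (parts, d, cur) l).2.2 ≠ [] then
       (List.foldl pvStepA (parts, d, cur) l).1 ++ [(List.foldl pvStepA (parts, d, cur) l).2.2]
     else (List.foldl pvStepA (parts, d, cur) l).1) = parts ++ pvSegs d cur l := by
  intro l
  induction l with
  | nil =>
    intro parts d cur
    simp only [List.foldl_nil, pvSegs]
    by_cases h : cur = [] <;> simp [h]
  | cons c cs ih =>
    intro parts d cur
    simp only [List.foldl_cons, pvSegs, pvStepA]
    by_cases h : c = ',' ∧ d = 0
    · simp only [if_pos h]
      rw [ih]
      simp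
    · simp only [if_neg h]
      rw [ih]

theorem pvSegs_eq_split : ∀ (l : List Char) (d : Int) (cur : List Char),
    pvSegs d cur l =
      match pvFindCut d l with
      | some (h, t) => (cur ++ h) :: pvSplit t
      | none => if cur ++ l = [] then [] else [cur ++ l] := by
  intro l
  induction l with
  | nil =>
    intro d cur
    simp [pvSegs, pvFindCut]
  | cons c cs ih =>
    intro d cur
    simp only [pvSegs, pvFindCut]
    by_cases h : c = ',' ∧ d = 0
    · obtain ⟨rfl, rfl⟩ := h
      rw [ih]
      simp only [and_self, if_true, List.nil_append]
      rw [pvSplit_eq]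
      by_cases hcs : cs = []
      · subst hcs; simp [pvFindCut]
      · simp only [if_neg hcs]
        cases hfc : pvFindCut 0 cs with
        | some p => obtain ⟨hh, tt⟩ := p; simp
        | none => simp
    · simp only [if_neg h]
      rw [ih]
      cases hfc : pvFindCut (if c = '(' then d + 1 else if c = ')' then d - 1 else d) cs with
      | some p =>
        obtain ⟨hh, tt⟩ := p
        simp
      | none =>
        simp

theorem pvSegs_eq_pvSplit (l : List Char) : pvSegs 0 [] l = pvSplit l := by
  rw [pvSegs_eq_split, pvSplit_eq]
  by_cases hl : l = []
  · subst hl; simp [pvFindCut]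
  · simp only [if_neg hl]
    cases hfc : pvFindCut 0 l with
    | some p => obtain ⟨h, t⟩ := p; simp
    | none => simp [hl]

-- ===== VERDICT (by name: the statement is the Claim_ definition above) =====
theorem tuple_component_types_py_spec : Claim_equal_tuple_component_types_py := by
  intro abi_type _
  unfold Spec_tuple_component_types_py tuple_component_types_py tuple_component_types_py_alt
  split_ifs with h
  · have key := pvFoldA_eq_pvSegs (PySem.Chars.slice abi_type.toList (some 1) (some (-1))) [] 0 []
    rw [List.nil_append, pvSegs_eq_pvSplit] at key
    exact congrArg (List.map String.ofList) key
  · rfl
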